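-- pv_equiv track=rewrite | github.com/surpmh/algorithms | Programmers/level2/148653.py | solution
-- ===== SOURCE A (Python) =====
-- def solution(storey):
--     answer = 0
--     num = 0
--
--     while storey:
--         num = storey % 10
--
--         if num > 5:
--             answer += 10 - num
--             storey += 10
--         elif num < 5:
--             answer += num
--         else:
--             answer += num
--             if (storey // 10) % 10 >= 5:
--                 storey += 10
--
--         storey //= 10
--
--     return answer
-- ===== SOURCE B (Python) =====
-- def solution(storey):
--     # Exhaustive recursion over the two choices per digit (round down / round up
--     # with carry), with the carry threaded explicitly instead of A's greedy rule.
--     def go(n, carry):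
--         if n == 0:
--             return carry
--         d = n % 10 + carry
--         if d == 10:
--             return go(n // 10, 1)
--         return min(d + go(n // 10, 0), (10 - d) + go(n // 10, 1))
--     return go(storey, 0)
-- ===== Notes on version B (the rewrite author's own statement) =====
-- stated objective: alternative
-- what changed: Replaces A's greedy per-digit loop with a digit-5 lookahead by an exhaustive recursion that threads the carry and takes the min of rounding each digit down or up.
-- outside the precondition, e.g. on solution(-1): A returns 1, B raises RecursionError
import Mathlib
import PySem

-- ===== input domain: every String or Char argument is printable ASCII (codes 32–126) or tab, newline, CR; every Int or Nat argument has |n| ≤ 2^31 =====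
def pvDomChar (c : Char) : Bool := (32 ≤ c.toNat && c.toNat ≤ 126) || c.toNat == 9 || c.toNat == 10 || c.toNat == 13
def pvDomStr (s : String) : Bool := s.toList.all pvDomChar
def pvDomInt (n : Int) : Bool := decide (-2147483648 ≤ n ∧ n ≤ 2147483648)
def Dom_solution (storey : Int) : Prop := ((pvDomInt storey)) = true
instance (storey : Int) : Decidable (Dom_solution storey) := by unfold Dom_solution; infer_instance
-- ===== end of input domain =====

-- B replaces A's greedy per-digit loop (with its digit-5 lookahead) by an exhaustive
-- carry-threading recursion taking the min of rounding each digit down or up (alternative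
-- decomposition, not faster).

-- ===== PORT A =====
-- the while-loop of A: state (storey, answer); 'storey //= 10' after a possible
-- 'storey += 10' is written literally as floordiv (storey + 10) 10.  The Nat fuel is
-- only a totality guard: |storey| strictly decreases on every iteration of A's loop,
-- so natAbs storey + 1 steps always suffice and the fuel-0 arm is never reached.
def pvLoopA : Nat → Int → Int → Int
  | 0, _, answer => answer
  | fuel + 1, storey, answer =>
    if storey = 0 then answer
    else
      let num := PySem.Int.mod storey 10
      if num > 5 then pvLoopA fuel (PySem.Int.floordiv (storey + 10) 10) (answer + (10 - num))
      else if num < 5 then pvLoopA fuel (PySem.Int.floordiv storey 10) (answer + num)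
      else
        if PySem.Int.mod (PySem.Int.floordiv storey 10) 10 ≥ 5 then
          pvLoopA fuel (PySem.Int.floordiv (storey + 10) 10) (answer + num)
        else pvLoopA fuel (PySem.Int.floordiv storey 10) (answer + num)

def solution (storey : Int) : Int := pvLoopA (storey.natAbs + 1) storey 0

-- ===== PORT B =====
-- go(n, carry) from Source B.  The Nat fuel is only a totality guard: for 0 ≤ n the
-- recursion depth is at most the number of digits, so natAbs n + 1 steps suffice;
-- for n < 0 Python's recursion never terminates (RecursionError), outside Pre_.
def pvGo : Nat → Int → Int → Int
  | 0, _, carry => carry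
  | fuel + 1, n, carry =>
    if n = 0 then carry
    else
      let d := PySem.Int.mod n 10 + carry
      if d = 10 then pvGo fuel (PySem.Int.floordiv n 10) 1
      else min (d + pvGo fuel (PySem.Int.floordiv n 10) 0)
               ((10 - d) + pvGo fuel (PySem.Int.floordiv n 10) 1)

def solution_alt (storey : Int) : Int := pvGo (storey.natAbs + 1) storey 0

-- ===== PRECONDITION & SPEC =====
-- Pre_ excludes negative storeys, which are outside the natural domain (floors are
-- nonnegative): A returns accidental loop values there while B's recursion raises
-- RecursionError.
def Pre_solution (storey : Int) : Prop := 0 ≤ storey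
instance (storey : Int) : Decidable (Pre_solution storey) := by unfold Pre_solution; infer_instance
def pvWitness_solution : Int := 2554

def Spec_solution (storey : Int) (out : Int) : Prop := out = solution_alt storey
instance (storey : Int) (out : Int) : Decidable (Spec_solution storey out) := by unfold Spec_solution; infer_instance

-- ===== CLAIM (what is proved, stated in full; the proofs are below) =====
def Claim_equal_solution : Prop := ∀ (storey : Int), Dom_solution storey → Pre_solution storey → Spec_solution storey (solution storey)

-- ===== LEMMAS AND PROOFS =====

-- PySem floored division/modulus coincide with Lean's Euclidean ones for divisor 10
theorem pvMod (s : Int) : PySem.Int.mod s 10 = s % 10 := by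
  simp [PySem.Int.mod, Int.fmod_eq_emod]

theorem pvDiv (s : Int) : PySem.Int.floordiv s 10 = s / 10 := by
  simp [PySem.Int.floordiv, Int.fdiv_eq_ediv]

-- the fuel is irrelevant once it exceeds |storey| (A's loop shrinks |storey| each step)
theorem pvLoopA_fuel (f g : Nat) (s a : Int) (hf : s.natAbs < f) (hg : s.natAbs < g) :
    pvLoopA f s a = pvLoopA g s a := by
  induction f generalizing g s a with
  | zero => omega
  | succ f ih =>
    cases g with
    | zero => omega
    | succ g =>
      by_cases h0 : s = 0
      · subst h0; simp [pvLoopA]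
      · simp only [pvLoopA, pvMod, pvDiv, if_neg h0, gt_iff_lt, ge_iff_le]
        split_ifs with c1 c2 c3 <;> exact ih g _ _ (by omega) (by omega)

-- the fuel is irrelevant once it exceeds n ≥ 0 (B recurses on n // 10)
theorem pvGo_fuel (f g : Nat) (n c : Int) (h : 0 ≤ n) (hf : n.toNat < f) (hg : n.toNat < g) :
    pvGo f n c = pvGo g n c := by
  induction f generalizing g n c with
  | zero => omega
  | succ f ih =>
    cases g with
    | zero => omega
    | succ g =>
      by_cases h0 : n = 0
      · subst h0; simp [pvGo]
      · simp only [pvGo, pvMod, pvDiv, if_neg h0]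
        rw [ih g (n / 10) 1 (by omega) (by omega) (by omega),
            ih g (n / 10) 0 (by omega) (by omega) (by omega)]

-- proof-side views of the two ports with canonical fuel
def pvL (s a : Int) : Int := pvLoopA (s.natAbs + 1) s a

def pvG (n c : Int) : Int := pvGo (n.toNat + 1) n c

theorem solution_eq_pvL (s : Int) : solution s = pvL s 0 := rfl

theorem solution_alt_eq_pvG (s : Int) (h : 0 ≤ s) : solution_alt s = pvG s 0 :=
  pvGo_fuel (s.natAbs + 1) (s.toNat + 1) s 0 h (by omega) (by omega)

-- one-step unfolding of B's recursion for positive n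
theorem pvG_eq (n c : Int) (h0 : 0 < n) :
    pvG n c = if n % 10 + c = 10 then pvG (n / 10) 1
      else min ((n % 10 + c) + pvG (n / 10) 0)
               ((10 - (n % 10 + c)) + pvG (n / 10) 1) := by
  unfold pvG
  conv_lhs => rw [pvGo]
  simp only [pvMod, pvDiv, if_neg (by omega : ¬ n = 0)]
  rw [pvGo_fuel n.toNat ((n / 10).toNat + 1) (n / 10) 1 (by omega) (by omega) (by omega),
      pvGo_fuel n.toNat ((n / 10).toNat + 1) (n / 10) 0 (by omega) (by omega) (by omega)]

-- one-step unfolding of A's loop for nonzero storey, in terms of pvL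
theorem pvL_eq (s a : Int) (h : s ≠ 0) :
    pvL s a =
      if 5 < s % 10 then pvL ((s + 10) / 10) (a + (10 - s % 10))
      else if s % 10 < 5 then pvL (s / 10) (a + s % 10)
      else if 5 ≤ (s / 10) % 10 then pvL ((s + 10) / 10) (a + s % 10)
      else pvL (s / 10) (a + s % 10) := by
  unfold pvL
  conv_lhs => rw [pvLoopA]
  simp only [pvMod, pvDiv, if_neg h, gt_iff_lt, ge_iff_le]
  split_ifs with c1 c2 c3 <;> exact pvLoopA_fuel _ _ _ _ (by omega) (by omega)

theorem pvL_zero (a : Int) : pvL 0 a = a := rfl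

theorem pvG_zero (c : Int) : pvG 0 c = c := rfl

-- A's accumulator is additive
theorem pvL_add (n a b : Int) : pvL n (a + b) = a + pvL n b := by
  by_cases h0 : n = 0
  · subst h0; rw [pvL_zero, pvL_zero]
  · rw [pvL_eq n (a + b) h0, pvL_eq n b h0]
    split_ifs <;> rw [add_assoc] <;> exact pvL_add _ _ _
termination_by n.natAbs
decreasing_by all_goals omega

-- A's loop with the accumulator pulled out of the recursive call
theorem pvF_eq (s : Int) (h : s ≠ 0) :
    pvL s 0 =
      if 5 < s % 10 then (10 - s % 10) + pvL ((s + 10) / 10) 0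
      else if s % 10 < 5 then s % 10 + pvL (s / 10) 0
      else if 5 ≤ (s / 10) % 10 then 5 + pvL ((s + 10) / 10) 0
      else 5 + pvL (s / 10) 0 := by
  rw [pvL_eq s 0 h]
  split_ifs with c1 c2 c3
  · rw [zero_add]; simpa using pvL_add ((s + 10) / 10) (10 - s % 10) 0
  · rw [zero_add]; simpa using pvL_add (s / 10) (s % 10) 0
  · have h5 : s % 10 = 5 := by omega
    rw [zero_add, h5]; simpa using pvL_add ((s + 10) / 10) 5 0
  · have h5 : s % 10 = 5 := by omega
    rw [zero_add, h5]; simpa using pvL_add (s / 10) 5 0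

-- invariants of B's recursion: values are nonnegative, the two carry values differ
-- by at most 1, and the carry is (dis)advantageous according to the last digit
theorem pvG_props (n : Int) (h : 0 ≤ n) :
    0 ≤ pvG n 0 ∧ 0 ≤ pvG n 1 ∧ pvG n 1 ≤ pvG n 0 + 1 ∧ pvG n 0 ≤ pvG n 1 + 1 ∧
      (5 ≤ n % 10 → pvG n 1 ≤ pvG n 0) ∧ (n % 10 < 5 → pvG n 0 ≤ pvG n 1) := by
  by_cases h0 : n = 0
  · subst h0
    simp only [pvG_zero]; omega
  · have hpos : 0 < n := by omega
    obtain ⟨p1, p2, p3, p4, _, _⟩ := pvG_props (n / 10) (by omega)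
    rw [pvG_eq n 0 hpos, pvG_eq n 1 hpos]
    split_ifs <;> omega
termination_by n.toNat
decreasing_by all_goals omega

-- a carry of 1 into the remaining prefix is the same as solving the successor
theorem pvG_succ (m : Int) (h : 0 ≤ m) : pvG (m + 1) 0 = pvG m 1 := by
  by_cases h0 : m = 0
  · subst h0
    rw [show (0 : Int) + 1 = 1 from rfl, pvG_eq 1 0 (by norm_num)]
    norm_num [pvG_zero]
  · have hpos : 0 < m := by omega
    by_cases h9 : m % 10 = 9
    · have e1 : (m + 1) % 10 = 0 := by omega
      have e2 : (m + 1) / 10 = m / 10 + 1 := by omega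
      rw [pvG_eq (m + 1) 0 (by omega), pvG_eq m 1 (by omega), e1, e2, h9]
      have hrec := pvG_succ (m / 10) (by omega)
      obtain ⟨q1, q2, q3, q4, _, _⟩ := pvG_props (m / 10 + 1) (by omega)
      split_ifs <;> omega
    · have e1 : (m + 1) % 10 = m % 10 + 1 := by omega
      have e2 : (m + 1) / 10 = m / 10 := by omega
      rw [pvG_eq (m + 1) 0 (by omega), pvG_eq m 1 (by omega), e1, e2]
      split_ifs <;> omega
termination_by m.toNat
decreasing_by all_goals omega

-- the greedy loop computes the exhaustive minimum
theorem pvL_eq_pvG (n : Int) (h : 0 ≤ n) : pvL n 0 = pvG n 0 := by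
  by_cases h0 : n = 0
  · subst h0; rw [pvL_zero, pvG_zero]
  · have hpos : 0 < n := by omega
    obtain ⟨p1, p2, p3, p4, p5, p6⟩ := pvG_props (n / 10) (by omega)
    have e3 : (n + 10) / 10 = n / 10 + 1 := by omega
    rw [pvF_eq n h0, pvG_eq n 0 hpos, e3, if_neg (by omega : ¬ (n % 10 + 0 = 10))]
    split_ifs with c1 c2 c3
    · rw [pvL_eq_pvG (n / 10 + 1) (by omega), pvG_succ (n / 10) (by omega)]
      omega
    · rw [pvL_eq_pvG (n / 10) (by omega)]
      omega
    · rw [pvL_eq_pvG (n / 10 + 1) (by omega), pvG_succ (n / 10) (by omega)]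
      omega
    · rw [pvL_eq_pvG (n / 10) (by omega)]
      omega
termination_by n.toNat
decreasing_by all_goals omega

-- ===== VERDICT (by name: the statement is the Claim_ definition above) =====
theorem solution_spec : Claim_equal_solution := by
  intro storey _ hpre
  unfold Spec_solution
  rw [solution_eq_pvL, solution_alt_eq_pvG storey hpre]
  exact pvL_eq_pvG storey hpre
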